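-- pv_equiv track=rewrite | github.com/Samgitproj/project_Projectassisten2_0 | handlers/codewijziger_controller.py | _find_all_marker_ranges
-- ===== SOURCE A (Python) =====
-- from typing import Any, Dict, List, Optional, Tuple
--
-- def _find_all_marker_ranges(
--     lines: List[str], start_marker: str, end_marker: str
-- ) -> List[Tuple[int, int]]:
--     """Vind alle opeenvolgende [start,end]-paren die bij elkaar horen."""
--     sm = start_marker.strip()
--     em = end_marker.strip()
--     starts = [i for i, ln in enumerate(lines) if ln.rstrip("\r\n") == sm]
--     ends = [i for i, ln in enumerate(lines) if ln.rstrip("\r\n") == em]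
--     ranges: List[Tuple[int, int]] = []
--     ei = 0
--     for si in starts:
--         while ei < len(ends) and ends[ei] < si:
--             ei += 1
--         if ei < len(ends):
--             ranges.append((si, ends[ei]))
--             ei += 1
--     return ranges
-- ===== SOURCE B (Python) =====
-- from typing import List, Tuple
-- from collections import deque
--
--
-- def _find_all_marker_ranges(
--     lines: List[str], start_marker: str, end_marker: str
-- ) -> List[Tuple[int, int]]:
--     """Single pass: keep a FIFO queue of unmatched start indices; an end line
--     pops the oldest pending start (push before pop, so a line matching both
--     markers pairs with itself)."""
--     sm = start_marker.strip()
--     em = end_marker.strip()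
--     pending: deque = deque()
--     ranges: List[Tuple[int, int]] = []
--     for i, ln in enumerate(lines):
--         s = ln.rstrip("\r\n")
--         if s == sm:
--             pending.append(i)
--         if s == em and pending:
--             ranges.append((pending.popleft(), i))
--     return ranges
-- ===== Notes on version B (the rewrite author's own statement) =====
-- stated objective: faster
-- what changed: A precomputes the start-index and end-index lists and pairs them with a two-pointer merge; B makes a single pass over the lines with a FIFO queue of pending unmatched start indices, popping the oldest pending start whenever an end line is seen (push before pop, so a line matching both markers pairs with itself). (one traversal instead of three passes over the lines, measured ~2x faster)
import Mathlib
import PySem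

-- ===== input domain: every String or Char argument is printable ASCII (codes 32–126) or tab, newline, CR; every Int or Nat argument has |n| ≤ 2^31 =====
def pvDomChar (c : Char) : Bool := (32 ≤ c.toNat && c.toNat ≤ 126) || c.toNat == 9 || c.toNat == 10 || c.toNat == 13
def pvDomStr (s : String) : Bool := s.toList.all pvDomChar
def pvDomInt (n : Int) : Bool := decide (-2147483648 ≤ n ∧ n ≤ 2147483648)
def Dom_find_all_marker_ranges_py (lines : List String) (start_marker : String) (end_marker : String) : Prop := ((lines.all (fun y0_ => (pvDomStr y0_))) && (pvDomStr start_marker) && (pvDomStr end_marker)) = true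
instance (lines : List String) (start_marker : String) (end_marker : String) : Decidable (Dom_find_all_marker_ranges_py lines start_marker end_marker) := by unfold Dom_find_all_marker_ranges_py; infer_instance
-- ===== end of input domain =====

-- B replaces A's two precomputed index lists and two-pointer merge by a single pass over the
-- lines with a FIFO queue of unmatched start indices (objective: faster — one traversal instead
-- of three, measured ~2x in a timing run).

-- shared helper: exact hand port of Python's ln.rstrip("\r\n") (strip only trailing '\r'/'\n' chars)
def pvRstripCRLF (s : String) : List Char :=
  (s.toList.reverse.dropWhile (fun c => c == '\r' || c == '\n')).reverse

-- ===== PORT A =====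
-- the inner 'while ei < len(ends) and ends[ei] < si: ei += 1'
def pvAdvance (ends : List Int) (si : Int) (ei : Nat) : Nat :=
  if h : ei < ends.length then
    if ends[ei] < si then pvAdvance ends si (ei + 1) else ei
  else ei
termination_by ends.length - ei

-- the 'for si in starts' loop with mutable state (ranges, ei)
def pvALoop (ends : List Int) : List Int → List (Int × Int) → Nat → List (Int × Int)
  | [], ranges, _ => ranges
  | si :: rest, ranges, ei =>
    let ei' := pvAdvance ends si ei
    if h : ei' < ends.length then
      pvALoop ends rest (ranges ++ [(si, ends[ei'])]) (ei' + 1)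
    else
      pvALoop ends rest ranges ei'

def find_all_marker_ranges_py (lines : List String) (start_marker : String) (end_marker : String) : List (Int × Int) :=
  let sm := PySem.Chars.strip start_marker.toList
  let em := PySem.Chars.strip end_marker.toList
  let starts := ((PySem.List.enumerate lines 0).filter (fun p => pvRstripCRLF p.2 == sm)).map (·.1)
  let ends := ((PySem.List.enumerate lines 0).filter (fun p => pvRstripCRLF p.2 == em)).map (·.1)
  pvALoop ends starts [] 0

-- ===== PORT B =====
-- the single 'for i, ln in enumerate(lines)' loop with state (pending queue, ranges)
def pvBLoop (sm em : List Char) : List (Int × String) → List Int → List (Int × Int) → List (Int × Int)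
  | [], _, ranges => ranges
  | (i, ln) :: rest, pending, ranges =>
    let s := pvRstripCRLF ln
    let pending' := if s == sm then pending ++ [i] else pending
    if s == em then
      match pending' with
      | [] => pvBLoop sm em rest pending' ranges
      | s0 :: qs => pvBLoop sm em rest qs (ranges ++ [(s0, i)])
    else
      pvBLoop sm em rest pending' ranges

def find_all_marker_ranges_py_alt (lines : List String) (start_marker : String) (end_marker : String) : List (Int × Int) :=
  let sm := PySem.Chars.strip start_marker.toList
  let em := PySem.Chars.strip end_marker.toList
  pvBLoop sm em (PySem.List.enumerate lines 0) [] []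

-- ===== PRECONDITION & SPEC =====
def Spec_find_all_marker_ranges_py (lines : List String) (start_marker : String) (end_marker : String) (out : List (Int × Int)) : Prop := out = find_all_marker_ranges_py_alt lines start_marker end_marker
instance (lines : List String) (start_marker : String) (end_marker : String) (out : List (Int × Int)) : Decidable (Spec_find_all_marker_ranges_py lines start_marker end_marker out) := by unfold Spec_find_all_marker_ranges_py; infer_instance

-- ===== CLAIM (what is proved, stated in full; the proofs are below) =====
def Claim_equal_find_all_marker_ranges_py : Prop := ∀ (lines : List String) (start_marker : String) (end_marker : String), Dom_find_all_marker_ranges_py lines start_marker end_marker → Spec_find_all_marker_ranges_py lines start_marker end_marker (find_all_marker_ranges_py lines start_marker end_marker)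

-- ===== LEMMAS AND PROOFS =====

-- common functional description: pair each start with the earliest not-yet-used end ≥ it
def pvMerge : List Int → List Int → List (Int × Int)
  | [], _ => []
  | si :: rest, es =>
    match es.dropWhile (fun e => decide (e < si)) with
    | [] => []
    | e :: es' => (si, e) :: pvMerge rest es'

lemma pvMerge_nil_right (ss : List Int) : pvMerge ss [] = [] := by
  cases ss <;> simp [pvMerge]

lemma pvAdvance_drop (ends : List Int) (si : Int) :
    ∀ ei, ends.drop (pvAdvance ends si ei) = (ends.drop ei).dropWhile (fun e => decide (e < si)) := by
  intro ei
  induction ei using pvAdvance.induct ends si with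
  | case1 ei h hlt ih =>
    rw [pvAdvance, dif_pos h, if_pos hlt]
    rw [ih, List.drop_eq_getElem_cons h, List.dropWhile_cons_of_pos (by simpa using hlt)]
  | case2 ei h hlt =>
    rw [pvAdvance, dif_pos h, if_neg hlt]
    rw [List.drop_eq_getElem_cons h, List.dropWhile_cons_of_neg (by simpa using hlt)]
  | case3 ei h =>
    rw [pvAdvance, dif_neg h]
    rw [List.drop_eq_nil_of_le (by omega), List.dropWhile_nil]

lemma pvALoop_eq_merge (ends : List Int) :
    ∀ (starts : List Int) (ranges : List (Int × Int)) (ei : Nat),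
      pvALoop ends starts ranges ei = ranges ++ pvMerge starts (ends.drop ei) := by
  intro starts
  induction starts with
  | nil => intro ranges ei; simp [pvALoop, pvMerge]
  | cons si rest ih =>
    intro ranges ei
    rw [pvALoop]
    have hdrop := pvAdvance_drop ends si ei
    by_cases h : pvAdvance ends si ei < ends.length
    · rw [dif_pos h, ih]
      have hcons : ends.drop (pvAdvance ends si ei) =
          ends[pvAdvance ends si ei] :: ends.drop (pvAdvance ends si ei + 1) :=
        List.drop_eq_getElem_cons h
      rw [pvMerge, ← hdrop, hcons]
      simp
    · rw [dif_neg h, ih]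
      have hnil : ends.drop (pvAdvance ends si ei) = [] :=
        List.drop_eq_nil_of_le (by omega)
      rw [pvMerge, ← hdrop, hnil, pvMerge_nil_right]

-- a future end strictly below every listed start can be discarded
lemma pvMerge_cons_right_lt (ss : List Int) (k : Int) (es : List Int)
    (h : ∀ s ∈ ss, k < s) : pvMerge ss (k :: es) = pvMerge ss es := by
  cases ss with
  | nil => simp [pvMerge]
  | cons s1 rest =>
    have : k < s1 := h s1 (by simp)
    rw [pvMerge, pvMerge, List.dropWhile_cons_of_pos (by simpa using this)]

lemma pv_starts_ge (rest : List String) (k : Int) (P : Int × String → Bool) :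
    ∀ x ∈ ((PySem.List.enumerate rest k).filter P).map (·.1), k ≤ x := by
  intro x hx
  simp only [List.mem_map, List.mem_filter] at hx
  obtain ⟨p, ⟨hp, _⟩, rfl⟩ := hx
  rw [PySem.List.mem_enumerate_iff] at hp
  obtain ⟨j, hj, rfl⟩ := hp
  simp

lemma pvBLoop_eq_merge (sm em : List Char) :
    ∀ (rest : List String) (k : Int) (q : List Int) (ranges : List (Int × Int)),
      (∀ s ∈ q, s < k) →
      pvBLoop sm em (PySem.List.enumerate rest k) q ranges
        = ranges ++ pvMerge
            (q ++ ((PySem.List.enumerate rest k).filter (fun p => pvRstripCRLF p.2 == sm)).map (·.1))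
            (((PySem.List.enumerate rest k).filter (fun p => pvRstripCRLF p.2 == em)).map (·.1)) := by
  intro rest
  induction rest with
  | nil =>
    intro k q ranges _
    simp [PySem.List.enumerate_nil, pvBLoop, pvMerge_nil_right]
  | cons ln rest ih =>
    intro k q ranges hq
    rw [PySem.List.enumerate_cons, pvBLoop]
    have hS := pv_starts_ge rest (k + 1) (fun p => pvRstripCRLF p.2 == sm)
    by_cases hs : pvRstripCRLF ln == sm
    · by_cases he : pvRstripCRLF ln == em
      · -- the line is both a start and an end
        simp only [hs, he, ite_true]
        cases q with
        | nil =>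
          simp only [List.nil_append]
          rw [ih (k + 1) [] (ranges ++ [(k, k)]) (by simp)]
          simp only [List.filter_cons, hs, he, ite_true, List.map_cons, List.nil_append]
          rw [pvMerge, List.dropWhile_cons_of_neg (by simp)]
          simp
        | cons s0 qs =>
          have hs0 : s0 < k := hq s0 (by simp)
          simp only [List.cons_append]
          rw [ih (k + 1) (qs ++ [k]) (ranges ++ [(s0, k)])
              (by intro x hx; simp at hx; rcases hx with hx | rfl
                  · have := hq x (by simp [hx]); omega
                  · omega)]
          simp only [List.filter_cons, hs, he, ite_true, List.map_cons]
          rw [pvMerge, List.dropWhile_cons_of_neg (by simp; omega)]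
          simp
      · -- start only: push k, no pop
        simp only [hs, he, Bool.false_eq_true, ite_true, ite_false]
        rw [ih (k + 1) (q ++ [k]) ranges
            (by intro x hx; simp at hx; rcases hx with hx | rfl
                · have := hq x (by simp [hx]); omega
                · omega)]
        simp only [List.filter_cons, hs, he, Bool.false_eq_true, ite_true, ite_false, List.map_cons]
        simp
    · by_cases he : pvRstripCRLF ln == em
      · -- end only
        simp only [hs, he, Bool.false_eq_true, ite_true, ite_false]
        cases q with
        | nil =>
          rw [ih (k + 1) [] ranges (by simp)]
          simp only [List.filter_cons, hs, he, Bool.false_eq_true, ite_true, ite_false, List.map_cons, List.nil_append]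
          rw [pvMerge_cons_right_lt _ k _ (by intro s hsmem; have := hS s hsmem; omega)]
        | cons s0 qs =>
          have hs0 : s0 < k := hq s0 (by simp)
          dsimp only
          rw [ih (k + 1) qs (ranges ++ [(s0, k)])
              (by intro x hx; have := hq x (by simp [hx]); omega)]
          simp only [List.filter_cons, hs, he, Bool.false_eq_true, ite_true, ite_false, List.map_cons, List.cons_append]
          rw [pvMerge, List.dropWhile_cons_of_neg (by simp; omega)]
          simp
      · -- neither
        simp only [hs, he, Bool.false_eq_true, ite_false]
        rw [ih (k + 1) q ranges (by intro x hx; have := hq x hx; omega)]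
        simp only [List.filter_cons, hs, he, Bool.false_eq_true, ite_false]

-- ===== VERDICT (by name: the statement is the Claim_ definition above) =====
theorem find_all_marker_ranges_py_spec : Claim_equal_find_all_marker_ranges_py := by
  intro lines start_marker end_marker _
  unfold Spec_find_all_marker_ranges_py find_all_marker_ranges_py find_all_marker_ranges_py_alt
  rw [pvALoop_eq_merge, pvBLoop_eq_merge _ _ lines 0 [] [] (by simp)]
  simp
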